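-- pv_equiv track=rewrite | github.com/pedrusphantom/encryption-algorithms | Python/affinecyher.py | Tableindex
-- ===== SOURCE A (Python) =====
-- table = ['a', 'b', 'c', 'd', 'e', 'f', 'g', 'h', 'i', 'j', 'k', 'l', 'm', 'n', 'o', 'p', 'q', 'r', 's', 't', 'u', 'v', 'w', 'x', 'y', 'z']
--
-- def Tableindex(n):
-- 	counter = 0
-- 	for i in table:
-- 		if n == i :
-- 			return counter
-- 		else:
-- 			counter += 1
-- 	return -1
-- ===== SOURCE B (Python) =====
-- def Tableindex(n):
--     if isinstance(n, str) and len(n) == 1 and 'a' <= n <= 'z':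
--         return ord(n) - ord('a')
--     return -1
-- ===== Notes on version B (the rewrite author's own statement) =====
-- stated objective: idiomatic
-- what changed: Replaces the linear scan over the 26-letter table with a closed-form computation from the character code, guarded by a lowercase-letter range check.
import Mathlib
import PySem

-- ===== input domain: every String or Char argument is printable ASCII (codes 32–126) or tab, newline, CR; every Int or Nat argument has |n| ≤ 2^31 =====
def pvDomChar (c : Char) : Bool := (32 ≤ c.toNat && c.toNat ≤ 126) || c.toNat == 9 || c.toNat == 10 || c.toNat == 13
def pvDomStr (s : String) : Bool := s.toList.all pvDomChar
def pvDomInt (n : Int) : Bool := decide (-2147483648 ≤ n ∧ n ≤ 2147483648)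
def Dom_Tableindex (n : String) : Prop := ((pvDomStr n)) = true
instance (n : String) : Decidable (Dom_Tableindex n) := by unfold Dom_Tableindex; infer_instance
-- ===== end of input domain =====

-- B replaces A's linear scan over the letter table by a closed-form
-- ord-arithmetic computation with a range guard (idiomatic; return value only).

-- ===== PORT A =====
def pvTable : List String :=
  ["a", "b", "c", "d", "e", "f", "g", "h", "i", "j", "k", "l", "m",
   "n", "o", "p", "q", "r", "s", "t", "u", "v", "w", "x", "y", "z"]

-- the for-loop over `table` with the running `counter`
def pvLoopA (n : String) : List String → Int → Int
  | [], _ => -1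
  | i :: rest, counter => if n = i then counter else pvLoopA n rest (counter + 1)

def Tableindex (n : String) : Int := pvLoopA n pvTable 0

-- ===== PORT B =====
def Tableindex_alt (n : String) : Int :=
  match n.toList with
  | [c] => if 'a' ≤ c ∧ c ≤ 'z' then (c.toNat : Int) - 97 else -1
  | _ => -1

-- ===== PRECONDITION & SPEC =====
def Spec_Tableindex (n : String) (out : Int) : Prop := out = Tableindex_alt n
instance (n : String) (out : Int) : Decidable (Spec_Tableindex n out) := by unfold Spec_Tableindex; infer_instance

-- ===== CLAIM (what is proved, stated in full; the proofs are below) =====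
def Claim_equal_Tableindex : Prop := ∀ (n : String), Dom_Tableindex n → Spec_Tableindex n (Tableindex n)

-- ===== LEMMAS AND PROOFS =====

theorem pv_alt_val (l : List Char) :
    Tableindex_alt (String.ofList l) =
      (match l with
        | [c] => if 'a' ≤ c ∧ c ≤ 'z' then ((c.toNat : Int) - 97) else -1
        | _ => -1) := by
  simp [Tableindex_alt]

theorem pv_main (n : String) : Tableindex n = Tableindex_alt n := by
  obtain ⟨l, rfl⟩ : ∃ l, n = String.ofList l := ⟨n.toList, by simp⟩
  rw [pv_alt_val]
  simp only [Tableindex, pvTable, pvLoopA]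
  match l with
  | [] => simp [← String.toList_inj]
  | c₁ :: c₂ :: rest => simp [← String.toList_inj]
  | [c] =>
      by_cases hr : 'a' ≤ c ∧ c ≤ 'z'
      · obtain ⟨h1, h2⟩ := hr
        have h1' : 97 ≤ c.toNat := by simpa [Char.le_def] using h1
        have h2' : c.toNat ≤ 122 := by simpa [Char.le_def] using h2
        rw [← Char.ofNat_toNat c]
        interval_cases h : c.toNat <;> decide
      · have hne : ∀ d : Char, 'a' ≤ d ∧ d ≤ 'z' →
            String.ofList [c] ≠ String.ofList [d] := by
          intro d hd he
          have h2 := String.toList_inj.mpr he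
          simp at h2
          subst h2
          exact hr hd
        rw [if_neg (hne 'a' ⟨by decide, by decide⟩), if_neg (hne 'b' ⟨by decide, by decide⟩), if_neg (hne 'c' ⟨by decide, by decide⟩), if_neg (hne 'd' ⟨by decide, by decide⟩), if_neg (hne 'e' ⟨by decide, by decide⟩), if_neg (hne 'f' ⟨by decide, by decide⟩), if_neg (hne 'g' ⟨by decide, by decide⟩), if_neg (hne 'h' ⟨by decide, by decide⟩), if_neg (hne 'i' ⟨by decide, by decide⟩), if_neg (hne 'j' ⟨by decide, by decide⟩), if_neg (hne 'k' ⟨by decide, by decide⟩), if_neg (hne 'l' ⟨by decide, by decide⟩), if_neg (hne 'm' ⟨by decide, by decide⟩), if_neg (hne 'n' ⟨by decide, by decide⟩), if_neg (hne 'o' ⟨by decide, by decide⟩), if_neg (hne 'p' ⟨by decide, by decide⟩), if_neg (hne 'q' ⟨by decide, by decide⟩), if_neg (hne 'r' ⟨by decide, by decide⟩), if_neg (hne 's' ⟨by decide, by decide⟩), if_neg (hne 't' ⟨by decide, by decide⟩), if_neg (hne 'u' ⟨by decide, by decide⟩), if_neg (hne 'v' ⟨by decide, by decide⟩), if_neg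 (hne 'w' ⟨by decide, by decide⟩), if_neg (hne 'x' ⟨by decide, by decide⟩), if_neg (hne 'y' ⟨by decide, by decide⟩), if_neg (hne 'z' ⟨by decide, by decide⟩)]
        show (-1 : Int) = if 'a' ≤ c ∧ c ≤ 'z' then ((c.toNat : Int) - 97) else -1
        rw [if_neg hr]

-- ===== VERDICT (by name: the statement is the Claim_ definition above) =====
theorem Tableindex_spec : Claim_equal_Tableindex := by
  intro n _
  unfold Spec_Tableindex
  exact pv_main n
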